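-- pv_equiv track=rewrite | github.com/VideoJope/SistemasDistribuidos | Lab5-chord/chord.py | belongsToChordInterval
-- ===== SOURCE A (Python) =====
-- def belongsToChordInterval(element, intervalStart, intervalEnd, mbits):
--     i = (intervalStart + 1) % 2**mbits
--     while i != intervalEnd:
--         if i == element:
--             return True
--         else:
--             i = (i + 1) % 2**mbits
--     return False
-- ===== SOURCE B (Python) =====
-- def belongsToChordInterval(element, intervalStart, intervalEnd, mbits):
--     # O(1): element is hit iff it lies strictly closer (walking forward from
--     # intervalStart+1) than intervalEnd does, and is a valid ring identifier.
--     M = 2 ** mbits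
--     if not (0 <= element < M):
--         return False
--     return (element - intervalStart - 1) % M < (intervalEnd - intervalStart - 1) % M
-- ===== Notes on version B (the rewrite author's own statement) =====
-- stated objective: faster
-- what changed: replaces the step-by-step walk around the ring (up to 2^mbits iterations) by a single O(1) modular-distance comparison: element is in the open interval iff (element-start-1) mod 2^mbits < (end-start-1) mod 2^mbits and element is a valid ring id
-- outside the precondition, e.g. on belongsToChordInterval(1, 0, 5, 1): A returns True, B returns False; on belongsToChordInterval(0, 0, 5, -1): A returns True, B returns False; on belongsToChordInterval(9, 0, -1, 2): A does not finish within the time limit, B returns False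
import Mathlib
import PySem

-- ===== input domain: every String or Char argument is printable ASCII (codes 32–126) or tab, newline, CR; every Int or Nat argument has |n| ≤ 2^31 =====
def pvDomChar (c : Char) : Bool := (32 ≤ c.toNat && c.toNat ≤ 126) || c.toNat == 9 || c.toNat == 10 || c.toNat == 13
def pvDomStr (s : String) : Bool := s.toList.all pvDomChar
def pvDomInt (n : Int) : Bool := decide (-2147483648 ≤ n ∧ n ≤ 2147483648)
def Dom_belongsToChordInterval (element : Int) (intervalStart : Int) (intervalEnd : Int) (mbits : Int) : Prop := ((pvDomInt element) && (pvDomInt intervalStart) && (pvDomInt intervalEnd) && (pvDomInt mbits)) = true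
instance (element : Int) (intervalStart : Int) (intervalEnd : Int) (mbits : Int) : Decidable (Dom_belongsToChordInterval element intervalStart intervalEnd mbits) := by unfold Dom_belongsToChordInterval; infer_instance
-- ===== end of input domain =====

-- B replaces A's step-by-step walk around the ring by one modular-distance
-- comparison (faster: A takes up to 2^mbits steps, B a constant number).

-- ===== PORT A =====
-- A's while loop; fuel = ring size 2^mbits, enough because under Pre_ the walk
-- reaches intervalEnd after at most 2^mbits - 1 steps.
def chordLoopA (element : Int) (intervalEnd : Int) (M : Int) : Int → Nat → Bool
  | _, 0 => false
  | i, fuel + 1 =>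
    if i = intervalEnd then false
    else if i = element then true
    else chordLoopA element intervalEnd M (PySem.Int.mod (i + 1) M) fuel

def belongsToChordInterval (element : Int) (intervalStart : Int) (intervalEnd : Int) (mbits : Int) : Bool :=
  let M : Int := (2 : Int) ^ mbits.toNat
  chordLoopA element intervalEnd M (PySem.Int.mod (intervalStart + 1) M) M.toNat

-- ===== PORT B =====
def belongsToChordInterval_alt (element : Int) (intervalStart : Int) (intervalEnd : Int) (mbits : Int) : Bool :=
  let M : Int := (2 : Int) ^ mbits.toNat
  if 0 ≤ element ∧ element < M then
    decide (PySem.Int.mod (element - intervalStart - 1) M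
              < PySem.Int.mod (intervalEnd - intervalStart - 1) M)
  else false

-- ===== PRECONDITION & SPEC =====
-- Pre_ excludes mbits < 0 (Python computes 2**mbits as a float there; A's result
-- is a float-arithmetic accident) and intervalEnd outside [0, 2^mbits) (there the
-- loop can never stop at intervalEnd, so A loops forever unless it happens to hit
-- element first).  On Dom (|intervalEnd| ≤ 2^31 < 2^32) the disjunct '32 ≤ mbits'
-- is exactly 'intervalEnd < 2^mbits'; it is written this way only so the condition
-- is cheap to decide for large mbits.
def Pre_belongsToChordInterval (element : Int) (intervalStart : Int) (intervalEnd : Int) (mbits : Int) : Prop :=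
  0 ≤ mbits ∧ 0 ≤ intervalEnd ∧ (32 ≤ mbits ∨ intervalEnd < (2 : Int) ^ mbits.toNat)
instance (element : Int) (intervalStart : Int) (intervalEnd : Int) (mbits : Int) : Decidable (Pre_belongsToChordInterval element intervalStart intervalEnd mbits) := by unfold Pre_belongsToChordInterval; infer_instance

def pvWitness_belongsToChordInterval : Int × Int × Int × Int := (3, 1, 6, 3)

def Spec_belongsToChordInterval (element : Int) (intervalStart : Int) (intervalEnd : Int) (mbits : Int) (out : Bool) : Prop := out = belongsToChordInterval_alt element intervalStart intervalEnd mbits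
instance (element : Int) (intervalStart : Int) (intervalEnd : Int) (mbits : Int) (out : Bool) : Decidable (Spec_belongsToChordInterval element intervalStart intervalEnd mbits out) := by unfold Spec_belongsToChordInterval; infer_instance

-- ===== CLAIM (what is proved, stated in full; the proofs are below) =====
def Claim_equal_belongsToChordInterval : Prop := ∀ (element : Int) (intervalStart : Int) (intervalEnd : Int) (mbits : Int), Dom_belongsToChordInterval element intervalStart intervalEnd mbits → Pre_belongsToChordInterval element intervalStart intervalEnd mbits → Spec_belongsToChordInterval element intervalStart intervalEnd mbits (belongsToChordInterval element intervalStart intervalEnd mbits)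

-- ===== LEMMAS AND PROOFS =====

-- a % M for a numerator already within (-M, M)
lemma emod_small (x M : Int) (h1 : -M < x) (h2 : x < M) :
    x % M = if 0 ≤ x then x else x + M := by
  split_ifs with h
  · exact Int.emod_eq_of_lt h h2
  · rw [← Int.emod_eq_of_lt (by omega : (0:Int) ≤ x + M) (by omega : x + M < M),
        show x + M = x + M * 1 by ring, Int.add_mul_emod_self_left]

-- the walk's distance from i to a ≠ i (both ring ids) is at least one step
lemma emod_pos_of_ne (a i M : Int) (ha : 0 ≤ a) (haM : a < M)
    (hi : 0 ≤ i) (hiM : i < M) (hne : a ≠ i) : 1 ≤ (a - i) % M := by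
  rw [emod_small (a - i) M (by omega) (by omega)]
  split_ifs <;> omega

-- one step of the walk shortens a positive modular distance by exactly one
lemma emod_pred (a M : Int) (hM : 1 < M) (ha : 1 ≤ a % M) : (a - 1) % M = a % M - 1 := by
  have hb : a % M < M := Int.emod_lt_of_pos a (by omega)
  rw [Int.sub_emod, Int.emod_eq_of_lt (by omega) hM,
      Int.emod_eq_of_lt (by omega) (by omega)]

-- shifting the walk's origin by one step
lemma emod_sub_step (M x i : Int) : (x - (i + 1) % M) % M = (x - i - 1) % M := by
  conv_lhs => rw [Int.sub_emod, Int.emod_emod_of_dvd _ (dvd_refl M), ← Int.sub_emod]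
  ring_nf

-- loop characterisation: starting at ring id i with enough fuel, the walk hits
-- element strictly before intervalEnd iff element is a ring id whose modular
-- distance from i is smaller than intervalEnd's
lemma chordLoopA_eq (element intervalEnd M : Int) (hM : 0 < M)
    (hen : 0 ≤ intervalEnd) (henM : intervalEnd < M) :
    ∀ (fuel : Nat) (i : Int), 0 ≤ i → i < M → (intervalEnd - i) % M < (fuel : Int) →
      chordLoopA element intervalEnd M i fuel
        = decide (0 ≤ element ∧ element < M ∧
            (element - i) % M < (intervalEnd - i) % M) := by
  intro fuel
  induction fuel with
  | zero =>
    intro i _ _ hfuel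
    have := Int.emod_nonneg (intervalEnd - i) (show M ≠ 0 by omega)
    push_cast at hfuel; omega
  | succ n ih =>
    intro i hi0 hiM hfuel
    by_cases hie : i = intervalEnd
    · have h0 : (intervalEnd - i) % M = 0 := by rw [hie]; simp
      have hnn : 0 ≤ (element - i) % M := Int.emod_nonneg _ (by omega)
      simp only [chordLoopA, if_pos hie]
      rw [eq_comm, decide_eq_false_iff_not]
      intro ⟨_, _, hlt⟩
      rw [h0] at hlt; omega
    · by_cases hel : i = element
      · have h0 : (element - i) % M = 0 := by rw [hel]; simp
        have hpos : 1 ≤ (intervalEnd - i) % M :=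
          emod_pos_of_ne intervalEnd i M hen henM hi0 hiM (by omega)
        simp only [chordLoopA, if_neg hie, if_pos hel]
        rw [eq_comm, decide_eq_true_iff]
        exact ⟨hel ▸ hi0, hel ▸ hiM, by rw [h0]; omega⟩
      · have hM2 : 1 < M := by
          by_contra h
          have : i = 0 ∧ intervalEnd = 0 := by omega
          exact hie (by omega)
        have hpos : 1 ≤ (intervalEnd - i) % M :=
          emod_pos_of_ne intervalEnd i M hen henM hi0 hiM (by omega)
        have hmod : PySem.Int.mod (i + 1) M = (i + 1) % M :=
          PySem.Int.mod_eq_emod_of_pos hM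
        have hi' : 0 ≤ (i + 1) % M := Int.emod_nonneg _ (by omega)
        have hi'M : (i + 1) % M < M := Int.emod_lt_of_pos _ hM
        have hen' : (intervalEnd - (i + 1) % M) % M = (intervalEnd - i) % M - 1 := by
          rw [emod_sub_step, show intervalEnd - i - 1 = (intervalEnd - i) - 1 by ring,
              emod_pred _ _ hM2 hpos]
        simp only [chordLoopA, if_neg hie, if_neg hel, hmod]
        rw [ih ((i + 1) % M) hi' hi'M (by push_cast at hfuel ⊢; omega)]
        rw [decide_eq_decide]
        constructor
        · rintro ⟨h1, h2, h3⟩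
          refine ⟨h1, h2, ?_⟩
          have hep : 1 ≤ (element - i) % M :=
            emod_pos_of_ne element i M h1 h2 hi0 hiM (fun h => hel h.symm)
          have he' : (element - (i + 1) % M) % M = (element - i) % M - 1 := by
            rw [emod_sub_step, show element - i - 1 = (element - i) - 1 by ring,
                emod_pred _ _ hM2 hep]
          rw [he', hen'] at h3; omega
        · rintro ⟨h1, h2, h3⟩
          refine ⟨h1, h2, ?_⟩
          have hep : 1 ≤ (element - i) % M :=
            emod_pos_of_ne element i M h1 h2 hi0 hiM (fun h => hel h.symm)
          have he' : (element - (i + 1) % M) % M = (element - i) % M - 1 := by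
            rw [emod_sub_step, show element - i - 1 = (element - i) - 1 by ring,
                emod_pred _ _ hM2 hep]
          rw [he', hen']; omega

-- ===== VERDICT (by name: the statement is the Claim_ definition above) =====
theorem belongsToChordInterval_spec : Claim_equal_belongsToChordInterval := by
  intro element intervalStart intervalEnd mbits hdom hpre
  unfold Spec_belongsToChordInterval
  obtain ⟨hm0, hen0, hcase⟩ := hpre
  set M : Int := (2 : Int) ^ mbits.toNat with hMdef
  have hM : 0 < M := pow_pos (by omega) _
  have henM : intervalEnd < M := by
    rcases hcase with h32 | hlt
    · have hd : intervalEnd ≤ 2147483648 := by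
        unfold Dom_belongsToChordInterval pvDomInt at hdom
        simp only [Bool.and_eq_true, decide_eq_true_eq] at hdom
        exact hdom.1.2.2
      have h1 : (2 : Int) ^ (32 : Nat) ≤ M := by
        apply pow_le_pow_right₀ (by norm_num)
        omega
      calc intervalEnd ≤ 2147483648 := hd
        _ < (2 : Int) ^ (32 : Nat) := by norm_num
        _ ≤ M := h1
    · exact hlt
  have hmod : ∀ a : Int, PySem.Int.mod a M = a % M :=
    fun a => PySem.Int.mod_eq_emod_of_pos hM
  unfold belongsToChordInterval belongsToChordInterval_alt
  rw [← hMdef]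
  show chordLoopA element intervalEnd M (PySem.Int.mod (intervalStart + 1) M) M.toNat
      = (if 0 ≤ element ∧ element < M then
          decide (PySem.Int.mod (element - intervalStart - 1) M
                    < PySem.Int.mod (intervalEnd - intervalStart - 1) M)
        else false)
  have hi0 : 0 ≤ (intervalStart + 1) % M := Int.emod_nonneg _ (by omega)
  have hi0M : (intervalStart + 1) % M < M := Int.emod_lt_of_pos _ hM
  have hfuel : (intervalEnd - (intervalStart + 1) % M) % M < ((M.toNat : Nat) : Int) := by
    rw [Int.toNat_of_nonneg (by omega)]
    exact Int.emod_lt_of_pos _ hM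
  rw [hmod (intervalStart + 1),
      chordLoopA_eq element intervalEnd M hM hen0 henM M.toNat _ hi0 hi0M hfuel,
      hmod (element - intervalStart - 1), hmod (intervalEnd - intervalStart - 1)]
  have he : (element - (intervalStart + 1) % M) % M = (element - intervalStart - 1) % M := by
    rw [emod_sub_step]
  have hen : (intervalEnd - (intervalStart + 1) % M) % M = (intervalEnd - intervalStart - 1) % M := by
    rw [emod_sub_step]
  rw [he, hen]
  split_ifs with h
  · rw [decide_eq_decide]
    exact ⟨fun ⟨_, _, h3⟩ => h3, fun h3 => ⟨h.1, h.2, h3⟩⟩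
  · rw [decide_eq_false_iff_not]
    intro ⟨h1, h2, _⟩
    exact h ⟨h1, h2⟩
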